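-- pv_equiv track=rewrite | github.com/namelessgamingco/poker-tracker | engine.py | _get_board_flush_suit
-- ===== SOURCE A (Python) =====
-- from typing import Optional, Tuple, List
--
-- def _get_board_flush_suit(board_cards: list) -> Optional[str]:
--     """Return the suit with 3+ cards on board, or None."""
--     if not board_cards:
--         return None
--     from collections import Counter
--     suit_counts = Counter(c[1] for c in board_cards)
--     for suit, count in suit_counts.most_common():
--         if count >= 3:
--             return suit
--     return None
-- ===== SOURCE B (Python) =====
-- def _get_board_flush_suit(board_cards: list):
--     """Return the suit with 3+ cards on board, or None."""
--     if not board_cards: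
--         return None
--     suits = [c[1] for c in board_cards]
--     best = max(suits, key=suits.count)
--     return best if suits.count(best) >= 3 else None
-- ===== Notes on version B (the rewrite author's own statement) =====
-- stated objective: idiomatic
-- what changed: Replaced Counter + most_common() (build a suit-count table, stable-sort it descending, scan for the first count >= 3) by the idiomatic one-liner max(suits, key=suits.count): no count table and no sort, Python's max keeps the first maximal element which reproduces most_common's stable insertion-order tie-break exactly.
import Mathlib
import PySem

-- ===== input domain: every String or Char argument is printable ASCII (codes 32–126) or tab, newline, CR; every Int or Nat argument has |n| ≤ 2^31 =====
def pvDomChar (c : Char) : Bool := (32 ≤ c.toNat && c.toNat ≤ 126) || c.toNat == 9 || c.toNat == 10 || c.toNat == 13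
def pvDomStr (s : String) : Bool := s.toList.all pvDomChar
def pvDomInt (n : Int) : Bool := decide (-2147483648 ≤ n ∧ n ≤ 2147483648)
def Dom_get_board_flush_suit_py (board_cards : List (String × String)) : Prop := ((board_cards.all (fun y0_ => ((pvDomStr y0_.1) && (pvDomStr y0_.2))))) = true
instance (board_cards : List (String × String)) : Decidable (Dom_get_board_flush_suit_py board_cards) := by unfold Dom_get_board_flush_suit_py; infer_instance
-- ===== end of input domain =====

-- B replaces Counter + most_common() (build a count table, sort it descending, scan for
-- a count >= 3) by max(suits, key=suits.count): no table and no sort, the one-liner an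
-- experienced Python developer would write; same value (max returns the first maximal
-- element, matching most_common's stable tie-break). Objective: simpler; not faster.


-- ===== PORT A =====
-- 'for suit, count in suit_counts.most_common(): if count >= 3: return suit' / 'return None'
def pvFindFlush : List (String × Int) → Option String
  | [] => none
  | (s, cnt) :: rest => if cnt ≥ 3 then some s else pvFindFlush rest

def get_board_flush_suit_py (board_cards : List (String × String)) : Option String :=
  if board_cards = [] then none
  else
    -- Counter(c[1] for c in board_cards); most_common() = sorted(items, key=count, reverse=True) (stable)
    let suit_counts := PySem.Dict.counter (board_cards.map (fun c => c.2))
    pvFindFlush (PySem.List.sorted suit_counts.items (fun kv => kv.2) true)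

-- ===== PORT B =====
def get_board_flush_suit_py_alt (board_cards : List (String × String)) : Option String :=
  if board_cards = [] then none
  else
    -- suits = [c[1] for c in board_cards]
    let suits := board_cards.map (fun c => c.2)
    -- best = max(suits, key=suits.count)  (Python max keeps the FIRST maximal element)
    match PySem.List.max? suits (fun s => (PySem.List.count suits s : Int)) with
    | none => none
    | some best =>
      -- return best if suits.count(best) >= 3 else None
      if (PySem.List.count suits best : Int) ≥ 3 then some best else none

-- ===== PRECONDITION & SPEC =====
def Spec_get_board_flush_suit_py (board_cards : List (String × String)) (out : Option String) : Prop := out = get_board_flush_suit_py_alt board_cards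
instance (board_cards : List (String × String)) (out : Option String) : Decidable (Spec_get_board_flush_suit_py board_cards out) := by unfold Spec_get_board_flush_suit_py; infer_instance

-- ===== CLAIM (what is proved, stated in full; the proofs are below) =====
def Claim_equal_get_board_flush_suit_py : Prop := ∀ (board_cards : List (String × String)), Dom_get_board_flush_suit_py board_cards → Spec_get_board_flush_suit_py board_cards (get_board_flush_suit_py board_cards)

-- ===== LEMMAS AND PROOFS =====

-- the strict-keep-first running-max step underlying PySem.List.max?
def pvMStep {α : Type} (key : α → Int) (acc : Option α) (x : α) : Option α :=
  match acc with
  | none => some x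
  | some m => if key m < key x then some x else some m

theorem pvMaxEqFoldl {α : Type} (xs : List α) (key : α → Int) :
    PySem.List.max? xs key = xs.foldl (pvMStep key) none := rfl

-- relation: head of the insertion-sort accumulator = running-max accumulator
def pvRel (acc : List (String × Int)) (macc : Option (String × Int)) : Prop :=
  match acc with
  | [] => macc = none
  | m :: _ => macc = some m

-- the head of the stable reverse insertion sort is the strict-keep-first running max
theorem pvScanHead (L : List (String × Int)) :
    ∀ (acc : List (String × Int)) (macc : Option (String × Int)), pvRel acc macc →
      pvRel (L.foldl (fun a x => PySem.List.insertBy (fun a b => decide (((fun kv : String × Int => kv.2) b) < ((fun kv : String × Int => kv.2) a))) x a) acc)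
            (L.foldl (pvMStep (fun kv => kv.2)) macc) := by
  induction L with
  | nil => intro acc macc h; simpa using h
  | cons x L ih =>
    intro acc macc hrel
    simp only [List.foldl_cons]
    apply ih
    cases acc with
    | nil =>
      simp only [pvRel] at hrel
      simp [PySem.List.insertBy, pvRel, pvMStep, hrel]
    | cons m t =>
      simp only [pvRel] at hrel
      by_cases h : m.2 < x.2
      · simp [PySem.List.insertBy, pvRel, pvMStep, hrel, h]
      · simp [PySem.List.insertBy, pvRel, pvMStep, hrel, h]

-- running max commutes with mapping f when the key is read through f
theorem pvScanMap (f : String → String × Int) (L : List String) :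
    ∀ (macc : Option String),
      (L.map f).foldl (pvMStep (fun kv => kv.2)) (macc.map f)
        = ((L.foldl (pvMStep (fun k => (f k).2)) macc).map f) := by
  induction L with
  | nil => intro macc; rfl
  | cons x L ih =>
    intro macc
    have hstep : pvMStep (fun kv : String × Int => kv.2) (macc.map f) (f x)
        = (pvMStep (fun k => (f k).2) macc x).map f := by
      cases macc with
      | none => rfl
      | some m =>
        by_cases h : (f m).2 < (f x).2
        · simp [pvMStep, h]
        · simp [pvMStep, h]
    simp only [List.map_cons, List.foldl_cons, hstep]
    exact ih _

-- pvFresh s xs = the elements of xs that are new (not in s, first occurrences only), in order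
def pvFresh (s : List String) : List String → List String
  | [] => []
  | x :: t => if PySem.Set.contains s x then pvFresh s t else x :: pvFresh (s ++ [x]) t

theorem pvOfListFresh (xs : List String) :
    ∀ s : List String, xs.foldl PySem.Set.add s = s ++ pvFresh s xs := by
  induction xs with
  | nil => intro s; simp [pvFresh]
  | cons x t ih =>
    intro s
    by_cases h : PySem.Set.contains s x
    · have hadd : PySem.Set.add s x = s := by unfold PySem.Set.add; rw [if_pos h]
      simp only [List.foldl_cons, hadd, pvFresh, if_pos h]
      exact ih s
    · have hadd : PySem.Set.add s x = s ++ [x] := by unfold PySem.Set.add; rw [if_neg h]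
      simp only [List.foldl_cons, hadd, pvFresh, if_neg h, ih (s ++ [x])]
      simp

-- duplicates never move the strict-keep-first running max: scanning xs equals scanning
-- only its fresh elements, provided every already-seen value is dominated by the accumulator
theorem pvScanFresh (key : String → Int) (xs : List String) :
    ∀ (s : List String) (macc : Option String),
      (∀ y ∈ s, ∃ m, macc = some m ∧ key y ≤ key m) →
      xs.foldl (pvMStep key) macc = (pvFresh s xs).foldl (pvMStep key) macc := by
  induction xs with
  | nil => intro s macc _; rfl
  | cons x t ih =>
    intro s macc hinv
    by_cases h : PySem.Set.contains s x
    · have hx : x ∈ s := by simpa [PySem.Set.contains] using h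
      obtain ⟨m, hm, hle⟩ := hinv x hx
      have hstep : pvMStep key macc x = macc := by
        simp [pvMStep, hm, not_lt.mpr hle]
      simp only [pvFresh, if_pos h, List.foldl_cons, hstep]
      exact ih s macc hinv
    · simp only [pvFresh, if_neg h, List.foldl_cons]
      apply ih (s ++ [x]) (pvMStep key macc x)
      intro y hy
      cases macc with
      | none =>
        have hs : s = [] := by
          by_contra hne
          obtain ⟨z, hz⟩ := List.exists_mem_of_ne_nil s hne
          obtain ⟨m, hm, _⟩ := hinv z hz
          simp at hm
        subst hs
        simp only [List.nil_append, List.mem_singleton] at hy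
        exact ⟨x, rfl, by rw [hy]⟩
      | some m =>
        have hstep : pvMStep key (some m) x = some (if key m < key x then x else m) := by
          by_cases hlt : key m < key x <;> simp [pvMStep, hlt]
        rcases List.mem_append.mp hy with hys | hyx
        · obtain ⟨m2, hm2, hle⟩ := hinv y hys
          have hmm : m2 = m := by injection hm2 with h'; exact h'.symm
          subst hmm
          refine ⟨_, hstep, ?_⟩
          split_ifs with hlt
          · exact le_trans hle (le_of_lt hlt)
          · exact hle
        · have hyx' : y = x := by simpa using hyx
          subst hyx'
          refine ⟨_, hstep, ?_⟩
          split_ifs with hlt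
          · exact le_refl _
          · exact not_lt.mp hlt

theorem pvFindFlush_none (l : List (String × Int)) (h : ∀ p ∈ l, p.2 < 3) :
    pvFindFlush l = none := by
  induction l with
  | nil => rfl
  | cons p l ih =>
    obtain ⟨s, c⟩ := p
    have hc : c < 3 := h (s, c) (List.mem_cons_self ..)
    simp only [pvFindFlush, if_neg (by omega : ¬ c ≥ 3)]
    exact ih (fun q hq => h q (List.mem_cons_of_mem _ hq))

-- ===== VERDICT (by name: the statement is the Claim_ definition above) =====
theorem get_board_flush_suit_py_spec : Claim_equal_get_board_flush_suit_py := by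
  intro board_cards _
  unfold Spec_get_board_flush_suit_py get_board_flush_suit_py get_board_flush_suit_py_alt
  by_cases hnil : board_cards = []
  · simp [hnil]
  · simp only [if_neg hnil]
    set suits := board_cards.map (fun c => c.2) with hsuits
    have hsne : suits ≠ [] := by simpa [hsuits] using hnil
    set key : String → Int := fun k => (PySem.List.count suits k : Int) with hkey
    set f : String → String × Int := fun k => (k, key k) with hf
    -- Counter items are the distinct suits (first occurrences) with their counts
    have hitems : (PySem.Dict.counter suits).items = (PySem.Set.ofList suits).map f := by
      rw [PySem.Dict.items_counter]
      simp [hf, hkey, PySem.List.count_eq]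
    -- B's max over suits = max over the distinct suits
    have hfresh : PySem.List.max? suits key
        = PySem.List.max? (PySem.Set.ofList suits) key := by
      rw [pvMaxEqFoldl, pvMaxEqFoldl,
        PySem.Set.ofList_eq_foldl, pvOfListFresh suits []]
      simpa using pvScanFresh key suits [] none (by simp)
    -- the head of most_common is max? over the items
    have hhead := pvScanHead (PySem.Dict.counter suits).items [] none rfl
    rw [← PySem.List.sorted_rev_eq_foldl_insertBy] at hhead
    rw [← pvMaxEqFoldl] at hhead
    cases hm : PySem.List.max? suits key with
    | none =>
      exact absurd ((PySem.List.max?_eq_none_iff suits key).mp hm) hsne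
    | some b =>
      have hmapped : PySem.List.max? (PySem.Dict.counter suits).items (fun kv => kv.2)
          = some (f b) := by
        rw [hitems, pvMaxEqFoldl]
        have := pvScanMap f (PySem.Set.ofList suits) none
        simp only [Option.map_none] at this
        rw [this]
        have hkf : (fun k => (f k).2) = key := by funext k; simp [hf]
        rw [hkf, ← pvMaxEqFoldl, ← hfresh, hm]
        rfl
      rw [hmapped] at hhead
      cases hS : PySem.List.sorted (PySem.Dict.counter suits).items (fun kv => kv.2) true with
      | nil => rw [hS] at hhead; simp [pvRel] at hhead
      | cons m t =>
        rw [hS] at hhead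
        simp only [pvRel] at hhead
        have hmb : m = f b := by injection hhead with h'; exact h'.symm
        subst hmb
        by_cases hc : key b ≥ 3
        · have h2 : 3 ≤ List.count b suits := by
            have h1 := hc
            simp only [hkey, ge_iff_le, PySem.List.count_eq] at h1
            exact_mod_cast h1
          simp [pvFindFlush, hf, hc, h2]
        · have hub := PySem.List.key_head_sorted_rev_ge _ (fun kv : String × Int => kv.2) hS
          have ht : ∀ p ∈ t, p.2 < 3 := by
            intro p hp
            have hpin : p ∈ (PySem.Dict.counter suits).items := by
              have hmem : p ∈ PySem.List.sorted (PySem.Dict.counter suits).items (fun kv => kv.2) true := by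
                rw [hS]; exact List.mem_cons_of_mem _ hp
              exact (PySem.List.mem_sorted ..).mp hmem
            have hple : p.2 ≤ key b := by simpa [hf] using hub p hpin
            simp only [hkey] at hc hple ⊢
            omega
          have h2 : ¬ 3 ≤ List.count b suits := by
            have h1 := hc
            simp only [hkey, ge_iff_le, PySem.List.count_eq] at h1
            exact_mod_cast h1
          simp [pvFindFlush, hf, hc, h2, pvFindFlush_none t ht]
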